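-- pv_equiv track=rewrite | github.com/JJustis/CrepeDecryptor | 99.py | _extend_pattern
-- ===== SOURCE A (Python) =====
-- def _extend_pattern(pattern: str, target_length: int) -> str:
--     """Extend a pattern to target length"""
--     if len(pattern) >= target_length:
--         return pattern[:target_length]
--
--     # Repeat pattern and add random hex
--     extended = pattern
--     while len(extended) < target_length:
--         if len(extended) + len(pattern) <= target_length:
--             extended += pattern
--         else:
--             # Fill remaining with pattern start or random hex
--             remaining = target_length - len(extended)
--             extended += pattern[:remaining]
--
--     return extended.lower()
-- ===== SOURCE B (Python) =====
-- def _extend_pattern(pattern: str, target_length: int) -> str: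
--     """Extend a pattern to target length"""
--     if len(pattern) >= target_length:
--         return pattern[:target_length]
--     n = -(-target_length // len(pattern))  # ceil division: minimal repeats covering target_length
--     return (pattern * n)[:target_length].lower()
-- ===== Notes on version B (the rewrite author's own statement) =====
-- stated objective: simpler
-- what changed: The incremental while-loop that concatenates the pattern piece by piece is replaced by a closed form: a ceil-division repeat count, one string multiplication, one slice and one lower(); the non-lowercased early branch is kept as is. Pre_ excludes pattern == '' with positive target_length, where A loops forever and B raises ZeroDivisionError.
import Mathlib
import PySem

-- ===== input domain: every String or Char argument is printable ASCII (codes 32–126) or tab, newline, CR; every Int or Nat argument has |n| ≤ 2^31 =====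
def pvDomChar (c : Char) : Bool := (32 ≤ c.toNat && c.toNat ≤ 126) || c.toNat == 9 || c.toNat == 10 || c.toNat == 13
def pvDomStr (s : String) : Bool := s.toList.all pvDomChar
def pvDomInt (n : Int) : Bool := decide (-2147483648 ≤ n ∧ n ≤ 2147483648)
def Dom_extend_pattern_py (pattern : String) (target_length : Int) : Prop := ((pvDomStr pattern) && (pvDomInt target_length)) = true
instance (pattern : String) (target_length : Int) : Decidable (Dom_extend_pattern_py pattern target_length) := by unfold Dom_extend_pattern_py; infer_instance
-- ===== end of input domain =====

-- B replaces A's incremental while-loop concatenation by a closed-form multiply-and-slice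
-- (ceil-division repeat count, then one slice and lower): simpler, same split between the
-- non-lowercased early branch and the lowercased extension branch.


-- ===== PORT A =====
-- the while-loop of A; fuel only makes it total (A diverges exactly when pattern = "" and
-- 0 < target_length, which Pre_ excludes); each iteration mirrors A's two branches
def pvALoop (p : List Char) (tl : Int) : Nat → List Char → List Char
  | 0, ext => ext
  | fuel + 1, ext =>
    if (ext.length : Int) < tl then
      if (ext.length : Int) + (p.length : Int) ≤ tl then
        pvALoop p tl fuel (ext ++ p)
      else
        pvALoop p tl fuel (ext ++ PySem.List.slice p none (some (tl - ext.length)))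
    else ext

def extend_pattern_py (pattern : String) (target_length : Int) : String :=
  let p := pattern.toList
  if (p.length : Int) ≥ target_length then
    String.ofList (PySem.List.slice p none (some target_length))
  else
    String.ofList (PySem.Chars.lower (pvALoop p target_length target_length.toNat p))

-- ===== PORT B =====
-- pattern * n, ported literally as flatten of n copies
def pvRepeat (p : List Char) (n : Nat) : List Char := (List.replicate n p).flatten

def extend_pattern_py_alt (pattern : String) (target_length : Int) : String :=
  let p := pattern.toList
  if (p.length : Int) ≥ target_length then
    String.ofList (PySem.List.slice p none (some target_length))
  else
    let n : Int := -(PySem.Int.floordiv (-target_length) (p.length : Int))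
    String.ofList (PySem.Chars.lower
      (PySem.List.slice (pvRepeat p n.toNat) none (some target_length)))

-- ===== PRECONDITION & SPEC =====
-- Pre_ excludes pattern = "" with 0 < target_length: there A's while-loop never
-- terminates (diverges), and B raises ZeroDivisionError.
def Pre_extend_pattern_py (pattern : String) (target_length : Int) : Prop :=
  ¬ (pattern = "" ∧ 0 < target_length)
instance (pattern : String) (target_length : Int) : Decidable (Pre_extend_pattern_py pattern target_length) := by unfold Pre_extend_pattern_py; infer_instance

def pvWitness_extend_pattern_py : String × Int := ("AbC", 8)

def Spec_extend_pattern_py (pattern : String) (target_length : Int) (out : String) : Prop := out = extend_pattern_py_alt pattern target_length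
instance (pattern : String) (target_length : Int) (out : String) : Decidable (Spec_extend_pattern_py pattern target_length out) := by unfold Spec_extend_pattern_py; infer_instance

-- ===== CLAIM (what is proved, stated in full; the proofs are below) =====
def Claim_equal_extend_pattern_py : Prop := ∀ (pattern : String) (target_length : Int), Dom_extend_pattern_py pattern target_length → Pre_extend_pattern_py pattern target_length → Spec_extend_pattern_py pattern target_length (extend_pattern_py pattern target_length)

-- ===== LEMMAS AND PROOFS =====

-- canonical "first r characters of p repeated forever" (proof-only helper)
def pvPad (p : List Char) (r : Nat) : List Char :=
  if _hp : p = [] then []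
  else if r = 0 then []
  else if _h : p.length ≤ r then p ++ pvPad p (r - p.length)
  else p.take r
termination_by r
decreasing_by
  have : 0 < p.length := List.length_pos_iff.mpr _hp
  omega

lemma pvPad_zero (p : List Char) : pvPad p 0 = [] := by
  rw [pvPad]; simp

lemma pvPad_step (p : List Char) (hp : p ≠ []) (r : Nat) (h1 : p.length ≤ r) :
    pvPad p r = p ++ pvPad p (r - p.length) := by
  have hplen : 0 < p.length := List.length_pos_iff.mpr hp
  rw [pvPad, dif_neg hp, if_neg (by omega), dif_pos h1]

lemma pvPad_small (p : List Char) (hp : p ≠ []) (r : Nat) (h1 : r < p.length) :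
    pvPad p r = p.take r := by
  by_cases h0 : r = 0
  · simp [h0, pvPad]
  · rw [pvPad, dif_neg hp, if_neg h0, dif_neg (by omega)]

lemma pvALoop_eq_pad (p : List Char) (hp : p ≠ []) (t : Nat)
    (fuel : Nat) (ext : List Char)
    (hle : ext.length ≤ t) (hfuel : t - ext.length ≤ fuel) :
    pvALoop p (t : Int) fuel ext = ext ++ pvPad p (t - ext.length) := by
  have hplen : 0 < p.length := List.length_pos_iff.mpr hp
  induction fuel generalizing ext with
  | zero =>
    have h0 : t - ext.length = 0 := by omega
    simp [pvALoop, h0, pvPad]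
  | succ fuel ih =>
    by_cases hlt : ext.length < t
    · by_cases hfit : ext.length + p.length ≤ t
      · rw [pvALoop, if_pos (by exact_mod_cast hlt),
            if_pos (by exact_mod_cast hfit)]
        have hl2 : (ext ++ p).length = ext.length + p.length := List.length_append
        rw [ih (ext ++ p) (by omega) (by omega)]
        rw [List.append_assoc]
        congr 1
        rw [pvPad_step p hp (t - ext.length) (by omega)]
        congr 2
        omega
      · rw [pvALoop, if_pos (by exact_mod_cast hlt),
            if_neg (by intro h; exact hfit (by exact_mod_cast h))]
        have hr : ((t : Int) - ext.length).toNat = t - ext.length := by omega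
        rw [PySem.List.slice_to p (by omega), hr]
        have hlen : (ext ++ p.take (t - ext.length)).length = t := by
          simp [List.length_append, List.length_take]
          omega
        rw [ih _ (by omega) (by omega), hlen, Nat.sub_self, pvPad_zero p,
           List.append_nil]
        congr 1
        rw [pvPad_small p hp (t - ext.length) (by omega)]
    · have h0 : t - ext.length = 0 := by omega
      rw [pvALoop, if_neg (by intro h; exact hlt (by exact_mod_cast h)), h0]
      rw [pvPad, dif_neg hp, if_pos rfl, List.append_nil]

lemma take_repeat_eq_pad (p : List Char) (hp : p ≠ []) (n t : Nat)
    (ht : t ≤ p.length * n) :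
    (pvRepeat p n).take t = pvPad p t := by
  have hplen : 0 < p.length := List.length_pos_iff.mpr hp
  induction n generalizing t with
  | zero =>
    have h0 : t = 0 := by omega
    simp [h0, pvRepeat, pvPad]
  | succ n ih =>
    have hrep : pvRepeat p (n + 1) = p ++ pvRepeat p n := by
      simp [pvRepeat, List.replicate_succ]
    rw [hrep, List.take_append]
    by_cases hle : p.length ≤ t
    · rw [List.take_of_length_le hle, ih (t - p.length)
        (by have hms : p.length * (n + 1) = p.length * n + p.length := by ring
            omega)]
      exact (pvPad_step p hp t hle).symm
    · have h0 : t - p.length = 0 := by omega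
      rw [h0]
      simp only [List.take_zero, List.append_nil]
      exact (pvPad_small p hp t (by omega)).symm

-- ===== VERDICT (by name: the statement is the Claim_ definition above) =====
theorem extend_pattern_py_spec : Claim_equal_extend_pattern_py := by
  intro pattern tl _hdom hpre
  unfold Spec_extend_pattern_py extend_pattern_py extend_pattern_py_alt
  by_cases hge : ((pattern.toList.length : Int) ≥ tl)
  · simp only [hge, if_pos]
  · simp only [hge, if_false]
    set p := pattern.toList with hpdef
    have hlt : (p.length : Int) < tl := by omega
    have htlpos : 0 < tl := by
      by_contra h
      exact hge (by omega)
    have hp : p ≠ [] := by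
      intro h
      apply hpre
      refine ⟨String.toList_eq_nil_iff.mp (by rw [← hpdef, h]), htlpos⟩
    have hplen : 0 < p.length := List.length_pos_iff.mpr hp
    set n : Int := -(PySem.Int.floordiv (-tl) (p.length : Int)) with hn
    have hceil := (PySem.Int.neg_floordiv_neg_eq_iff_of_pos
        (a := tl) (b := (p.length : Int)) (q := n) (by exact_mod_cast hplen)).mp hn.symm
    have hnpos : 0 < n := by nlinarith [hceil.2]
    have hhn : ((n.toNat : Nat) : Int) = n := Int.toNat_of_nonneg (by omega)
    have hcover : tl.toNat ≤ p.length * n.toNat := by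
      have h2 : tl ≤ ((p.length * n.toNat : Nat) : Int) := by
        push_cast [hhn]
        linarith [hceil.2]
      omega
    set t : Nat := tl.toNat with htdef
    have htc : (t : Int) = tl := Int.toNat_of_nonneg (by omega)
    congr 1
    congr 1
    rw [PySem.List.slice_to _ (by omega), ← htdef]
    rw [take_repeat_eq_pad p hp n.toNat t hcover]
    rw [← htc]
    rw [pvALoop_eq_pad p hp t t p (by omega) (by omega)]
    exact (pvPad_step p hp t (by omega)).symm
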